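-- pv_equiv track=rewrite | github.com/Kaivalya192/2.5d-custom | pose/rs_rgb_circle_pose_o3d.py | debug_reasons_line
-- ===== SOURCE A (Python) =====
-- def debug_reasons_line(stats: dict, top_k: int = 4) -> str:
--     if not stats:
--         return ""
--     items = [(k, int(v)) for k, v in stats.items() if k != "pass" and int(v) > 0]
--     if not items:
--         return "reasons=none"
--     items.sort(key=lambda kv: kv[1], reverse=True)
--     top = items[: max(1, int(top_k))]
--     return "reasons=" + ",".join([f"{k}:{v}" for k, v in top])
-- ===== SOURCE B (Python) =====
-- def debug_reasons_line(stats: dict, top_k: int = 4) -> str: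
--     # One-pass bounded selection: maintain a running top-n list (descending,
--     # stable on ties) instead of filtering + fully sorting + slicing.
--     if not stats:
--         return ""
--     n = max(1, int(top_k))
--     top = []          # at most n entries, descending by count, ties in arrival order
--     found = False
--     for k, v in stats.items():
--         v = int(v)
--         if k == "pass" or v <= 0:
--             continue
--         found = True
--         i = 0
--         while i < len(top) and top[i][1] >= v:
--             i += 1
--         top.insert(i, (k, v))
--         del top[n:]
--     if not found:
--         return "reasons=none"
--     return "reasons=" + ",".join(f"{k}:{v}" for k, v in top)
-- ===== Notes on version B (the rewrite author's own statement) =====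
-- stated objective: alternative
-- what changed: Replaces filter + full stable sort + slice with a single pass that maintains a bounded running top-k list by ordered insertion and truncation.
import Mathlib
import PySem

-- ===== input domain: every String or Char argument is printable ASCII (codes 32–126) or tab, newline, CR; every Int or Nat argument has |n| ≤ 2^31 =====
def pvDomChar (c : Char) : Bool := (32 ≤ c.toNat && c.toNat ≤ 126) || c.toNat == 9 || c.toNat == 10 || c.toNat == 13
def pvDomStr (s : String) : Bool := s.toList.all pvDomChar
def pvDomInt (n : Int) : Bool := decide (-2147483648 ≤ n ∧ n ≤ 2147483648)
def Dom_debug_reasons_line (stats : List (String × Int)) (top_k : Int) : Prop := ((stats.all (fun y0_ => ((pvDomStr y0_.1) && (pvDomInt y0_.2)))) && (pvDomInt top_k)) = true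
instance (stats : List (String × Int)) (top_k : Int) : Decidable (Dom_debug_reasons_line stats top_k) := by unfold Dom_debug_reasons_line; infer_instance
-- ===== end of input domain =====

-- B replaces filter + full stable sort + slice by a one-pass bounded top-k selection
-- (ordered insertion into a list kept at length ≤ k); same output, alternative algorithm.


-- ===== PORT A =====
def debug_reasons_line (stats : List (String × Int)) (top_k : Int) : String :=
  if stats.isEmpty then "" else
  let items := stats.filter (fun kv => kv.1 != "pass" && decide (0 < kv.2))
  if items.isEmpty then "reasons=none" else
  let sortedItems := PySem.List.sorted items (fun kv => kv.2) true
  let top := PySem.List.slice sortedItems none (some (max 1 top_k))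
  "reasons=" ++ PySem.Str.join "," (top.map (fun kv => kv.1 ++ ":" ++ PySem.Int.toStr kv.2))

-- ===== PORT B =====
-- the `while i < len(top) and top[i][1] >= v: i += 1; top.insert(i, (k, v))` insertion
def pvInsertDesc (x : String × Int) : List (String × Int) → List (String × Int)
  | [] => [x]
  | y :: ys => if y.2 ≥ x.2 then y :: pvInsertDesc x ys else x :: y :: ys

def debug_reasons_line_alt (stats : List (String × Int)) (top_k : Int) : String :=
  if stats.isEmpty then "" else
  let n := (max 1 top_k).toNat
  let st := stats.foldl (fun (st : List (String × Int) × Bool) kv =>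
      if kv.1 == "pass" || kv.2 ≤ 0 then st
      else ((pvInsertDesc kv st.1).take n, true)) ([], false)
  if !st.2 then "reasons=none" else
  "reasons=" ++ PySem.Str.join "," (st.1.map (fun kv => kv.1 ++ ":" ++ PySem.Int.toStr kv.2))

-- ===== PRECONDITION & SPEC =====
def Spec_debug_reasons_line (stats : List (String × Int)) (top_k : Int) (out : String) : Prop := out = debug_reasons_line_alt stats top_k
instance (stats : List (String × Int)) (top_k : Int) (out : String) : Decidable (Spec_debug_reasons_line stats top_k out) := by unfold Spec_debug_reasons_line; infer_instance

-- ===== CLAIM (what is proved, stated in full; the proofs are below) =====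
def Claim_equal_debug_reasons_line : Prop := ∀ (stats : List (String × Int)) (top_k : Int), Dom_debug_reasons_line stats top_k → Spec_debug_reasons_line stats top_k (debug_reasons_line stats top_k)

-- ===== LEMMAS AND PROOFS =====

def pvBefore : (String × Int) → (String × Int) → Bool := fun a b => decide (b.2 < a.2)

theorem pvInsertDesc_eq_insertBy (x : String × Int) (l : List (String × Int)) :
    pvInsertDesc x l = PySem.List.insertBy pvBefore x l := by
  induction l with
  | nil => rfl
  | cons y ys ih =>
      simp only [pvInsertDesc, PySem.List.insertBy, pvBefore]
      by_cases h : y.2 ≥ x.2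
      · simp [h, show ¬ (y.2 < x.2) by omega, ih]
      · simp [h, show y.2 < x.2 by omega]

theorem take_insertBy (x : String × Int) (l : List (String × Int)) (n : Nat) :
    (PySem.List.insertBy pvBefore x (l.take n)).take n
      = (PySem.List.insertBy pvBefore x l).take n := by
  induction l generalizing n with
  | nil => simp
  | cons y ys ih =>
      cases n with
      | zero => simp
      | succ m =>
          simp only [List.take_succ_cons, PySem.List.insertBy]
          by_cases h : pvBefore x y = true
          · simp only [h, if_true, List.take_succ_cons]
            cases m with
            | zero => simp
            | succ k => simp [List.take_take]
          · simp [h, List.take_succ_cons, ih]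

-- bounded insertion fold = take n of the unbounded insertion fold
theorem bounded_fold (xs : List (String × Int)) (n : Nat) :
    ∀ l : List (String × Int),
    xs.foldl (fun acc kv => (PySem.List.insertBy pvBefore kv acc).take n) (l.take n)
      = (xs.foldl (fun acc kv => PySem.List.insertBy pvBefore kv acc) l).take n := by
  induction xs with
  | nil => intro l; simp
  | cons x xs ih =>
      intro l
      simp only [List.foldl_cons]
      rw [take_insertBy]
      exact ih (PySem.List.insertBy pvBefore x l)

theorem foldl_pvInsert_eq (xs : List (String × Int)) (n : Nat) :
    ∀ l, xs.foldl (fun acc kv => (pvInsertDesc kv acc).take n) l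
      = xs.foldl (fun acc kv => (PySem.List.insertBy pvBefore kv acc).take n) l := by
  induction xs with
  | nil => intro l; rfl
  | cons x xs ih => intro l; simp only [List.foldl_cons, pvInsertDesc_eq_insertBy]

-- B's loop over stats = the bounded fold over A's filtered items, plus a nonemptiness flag
theorem loop_eq_filter (stats : List (String × Int)) (n : Nat) :
    ∀ (l : List (String × Int)) (f : Bool),
    stats.foldl (fun (st : List (String × Int) × Bool) kv =>
        if kv.1 == "pass" || kv.2 ≤ 0 then st
        else ((pvInsertDesc kv st.1).take n, true)) (l, f)
      = ((stats.filter (fun kv => kv.1 != "pass" && decide (0 < kv.2))).foldl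
            (fun acc kv => (pvInsertDesc kv acc).take n) l,
         f || !(stats.filter (fun kv => kv.1 != "pass" && decide (0 < kv.2))).isEmpty) := by
  induction stats with
  | nil => intro l f; simp
  | cons x xs ih =>
      intro l f
      by_cases h : (x.1 == "pass" || x.2 ≤ 0 : Bool) = true
      · have hfil : (x.1 != "pass" && decide (0 < x.2)) = false := by
          rcases Bool.or_eq_true_iff.mp h with h1 | h2
          · simp [eq_of_beq h1]
          · have h2' : x.2 ≤ 0 := of_decide_eq_true h2
            simp only [Bool.and_eq_false_iff]
            right; simp; omega
        simp only [List.foldl_cons, List.filter_cons, hfil, if_pos h, Bool.false_eq_true,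
          if_false, ih]
      · have hfil : (x.1 != "pass" && decide (0 < x.2)) = true := by
          simp only [Bool.or_eq_true, not_or, beq_iff_eq, decide_eq_true_eq] at h
          obtain ⟨ha, hb⟩ := h
          simp only [Bool.and_eq_true, bne_iff_ne, decide_eq_true_eq]
          exact ⟨fun hx => ha (by simpa using hx), by omega⟩
        simp only [List.foldl_cons]
        rw [if_neg h, ih]
        simp [hfil]

-- ===== VERDICT (by name: the statement is the Claim_ definition above) =====
theorem debug_reasons_line_spec : Claim_equal_debug_reasons_line := by
  intro stats top_k _
  unfold Spec_debug_reasons_line debug_reasons_line debug_reasons_line_alt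
  by_cases hs : stats.isEmpty
  · simp [hs]
  · simp only [hs, Bool.false_eq_true, if_false]
    rw [loop_eq_filter]
    by_cases hi : (stats.filter (fun kv => kv.1 != "pass" && decide (0 < kv.2))).isEmpty
    · simp [hi]
    · simp only [Bool.false_or]
      have hB : (stats.filter (fun kv => kv.1 != "pass" && decide (0 < kv.2))).foldl
            (fun acc kv => (pvInsertDesc kv acc).take (max 1 top_k).toNat) []
          = (PySem.List.sorted (stats.filter (fun kv => kv.1 != "pass" && decide (0 < kv.2)))
              (fun kv => kv.2) true).take (max 1 top_k).toNat := by
        rw [foldl_pvInsert_eq, PySem.List.sorted_rev_eq_foldl_insertBy]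
        have h0 := bounded_fold (stats.filter (fun kv => kv.1 != "pass" && decide (0 < kv.2)))
            (max 1 top_k).toNat []
        simpa using h0
      have hA := PySem.List.slice_to
          (PySem.List.sorted (stats.filter (fun kv => kv.1 != "pass" && decide (0 < kv.2)))
            (fun kv => kv.2) true) (b := max 1 top_k) (by omega)
      rw [hA, hB, Bool.not_not, if_neg hi]
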